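-- pv_equiv track=rewrite | github.com/UKPLab/acl2020-dialogue-coherence-assessment | create_coherency_dataset.py | speaker_segment_ixs
-- ===== SOURCE A (Python) =====
-- def speaker_segment_ixs(speaker_ixs):
--     i = 0
--     segment_indices = dict()
--     prev_speaker = speaker_ixs[0]
--     for j,speaker in enumerate(speaker_ixs):
--         if speaker != prev_speaker:
--             prev_speaker = speaker
--             i += 1
--         segment_indices[j] = i
--     return segment_indices
-- ===== SOURCE B (Python) =====
-- def speaker_segment_ixs(speaker_ixs):
--     # run-oriented pass: walk maximal runs of equal speakers; run number = segment index
--     segment_indices = {}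
--     n = len(speaker_ixs)
--     j = 0
--     run = 0
--     while j < n:
--         v = speaker_ixs[j]
--         segment_indices[j] = run
--         k = j + 1
--         while k < n and speaker_ixs[k] == v:
--             segment_indices[k] = run
--             k += 1
--         j = k
--         run += 1
--     return segment_indices
-- ===== Notes on version B (the rewrite author's own statement) =====
-- stated objective: alternative
-- what changed: B replaces A's per-element prev_speaker comparison with a run-oriented pass: an outer loop over maximal runs of equal consecutive speakers (the run number is the segment index) and an inner scan consuming each run; same O(n) cost, different loop structure. Pre_ excludes only the empty list, on which A raises IndexError while reading the initial prev_speaker.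
import Mathlib
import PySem

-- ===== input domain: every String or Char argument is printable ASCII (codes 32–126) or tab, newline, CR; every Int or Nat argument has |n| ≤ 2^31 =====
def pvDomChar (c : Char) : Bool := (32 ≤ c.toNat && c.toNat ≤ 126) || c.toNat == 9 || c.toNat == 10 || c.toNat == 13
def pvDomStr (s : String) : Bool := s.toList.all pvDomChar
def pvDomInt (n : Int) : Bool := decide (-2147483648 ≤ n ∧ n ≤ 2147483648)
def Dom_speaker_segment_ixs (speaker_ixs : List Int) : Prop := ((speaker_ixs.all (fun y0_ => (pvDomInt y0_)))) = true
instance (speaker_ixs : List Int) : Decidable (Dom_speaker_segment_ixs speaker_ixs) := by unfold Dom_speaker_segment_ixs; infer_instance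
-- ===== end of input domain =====

-- B walks maximal runs of equal consecutive speakers (run number = segment index) instead of
-- A's per-element prev_speaker comparison; same result, different loop decomposition.


-- ===== PORT A =====
-- A's for-loop over enumerate(speaker_ixs) with state (prev_speaker, i, segment_indices)
def pvALoop : List Int → Int → Int → Int → PySem.Dict Int Int → PySem.Dict Int Int
  | [], _, _, _, d => d
  | speaker :: rest, j, prev, i, d =>
      if speaker ≠ prev then pvALoop rest (j + 1) speaker (i + 1) (d.insert j (i + 1))
      else pvALoop rest (j + 1) prev i (d.insert j i)

def speaker_segment_ixs (speaker_ixs : List Int) : List (Int × Int) :=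
  match speaker_ixs with
  | [] => []   -- Python raises IndexError here (speaker_ixs[0]); excluded by Pre_
  | prev0 :: _ => (pvALoop speaker_ixs 0 prev0 0 PySem.Dict.empty).items

-- ===== PORT B =====
-- B's inner while loop: consume the rest of the current run of value v, emitting (k, run);
-- returns (emitted entries, remaining list, next position k)
def pvBInner (v run : Int) : List Int → Int → List (Int × Int) × List Int × Int
  | x :: rest, k =>
      if x = v then
        let r := pvBInner v run rest (k + 1)
        ((k, run) :: r.1, r.2)
      else ([], x :: rest, k)
  | [], k => ([], [], k)

-- B's outer while loop over runs; the Nat argument is fuel (the inner loop consumes at least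
-- one element per outer step, so fuel = length suffices) making the recursion structural
def pvBGo : Nat → List Int → Int → Int → List (Int × Int)
  | 0, _, _, _ => []
  | _ + 1, [], _, _ => []
  | n + 1, x :: rest, j, run =>
      let r := pvBInner x run rest (j + 1)
      ((j, run) :: r.1) ++ pvBGo n r.2.1 r.2.2 (run + 1)

def speaker_segment_ixs_alt (speaker_ixs : List Int) : List (Int × Int) :=
  pvBGo speaker_ixs.length speaker_ixs 0 0

-- ===== PRECONDITION & SPEC =====
-- A evaluates speaker_ixs[0] before the loop: it raises IndexError on the empty list.
def Pre_speaker_segment_ixs (speaker_ixs : List Int) : Prop := speaker_ixs ≠ []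
instance (speaker_ixs : List Int) : Decidable (Pre_speaker_segment_ixs speaker_ixs) := by unfold Pre_speaker_segment_ixs; infer_instance
def pvWitness_speaker_segment_ixs : List Int := [1, 1, 2]

def Spec_speaker_segment_ixs (speaker_ixs : List Int) (out : List (Int × Int)) : Prop := out = speaker_segment_ixs_alt speaker_ixs
instance (speaker_ixs : List Int) (out : List (Int × Int)) : Decidable (Spec_speaker_segment_ixs speaker_ixs out) := by unfold Spec_speaker_segment_ixs; infer_instance

-- ===== CLAIM (what is proved, stated in full; the proofs are below) =====
def Claim_equal_speaker_segment_ixs : Prop := ∀ (speaker_ixs : List Int), Dom_speaker_segment_ixs speaker_ixs → Pre_speaker_segment_ixs speaker_ixs → Spec_speaker_segment_ixs speaker_ixs (speaker_segment_ixs speaker_ixs)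

-- ===== LEMMAS AND PROOFS =====

-- pure image of A's loop: the list of (index, segment) pairs it appends
def pvF : List Int → Int → Int → Int → List (Int × Int)
  | [], _, _, _ => []
  | y :: rest, j, prev, i =>
      if y ≠ prev then (j, i + 1) :: pvF rest (j + 1) y (i + 1)
      else (j, i) :: pvF rest (j + 1) prev i

theorem pvALoop_items (ys : List Int) : ∀ (j prev i : Int) (d : PySem.Dict Int Int),
    (∀ p ∈ d.items, p.1 < j) →
    (pvALoop ys j prev i d).items = d.items ++ pvF ys j prev i := by
  induction ys with
  | nil => intro j prev i d _; simp [pvALoop, pvF]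
  | cons y rest ih =>
      intro j prev i d hd
      have hc : d.contains j = false := by
        rw [PySem.Dict.contains_eq_decide_mem_keys]
        simp only [decide_eq_false_iff_not, PySem.Dict.keys, List.mem_map]
        rintro ⟨p, hp, rfl⟩
        exact absurd (hd p hp) (lt_irrefl _)
      have hins : ∀ v : Int, (d.insert j v).items = d.items ++ [(j, v)] :=
        fun v => PySem.Dict.items_insert_of_not_contains d v hc
      have hlt : ∀ v : Int, ∀ p ∈ (d.insert j v).items, p.1 < j + 1 := by
        intro v p hp
        rw [hins v] at hp
        rcases List.mem_append.mp hp with h | h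
        · exact lt_trans (hd p h) (lt_add_one j)
        · rcases List.mem_singleton.mp h with rfl; simp
      by_cases h : y = prev
      · rw [show pvALoop (y :: rest) j prev i d = pvALoop rest (j + 1) prev i (d.insert j i) by
          simp [pvALoop, h]]
        rw [ih (j + 1) prev i (d.insert j i) (hlt i), hins i]
        simp [pvF, h]
      · rw [show pvALoop (y :: rest) j prev i d
              = pvALoop rest (j + 1) y (i + 1) (d.insert j (i + 1)) by simp [pvALoop, h]]
        rw [ih (j + 1) y (i + 1) (d.insert j (i + 1)) (hlt (i + 1)), hins (i + 1)]
        simp [pvF, h]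

-- the central bridge: A's pure loop image, started inside a run of value v at segment i,
-- equals B's inner-run emission followed by B's outer loop on the remainder
theorem pvF_eq_bGo (ys : List Int) : ∀ (n : Nat) (v i j : Int), ys.length ≤ n →
    pvF ys j v i = (pvBInner v i ys j).1
      ++ pvBGo n (pvBInner v i ys j).2.1 (pvBInner v i ys j).2.2 (i + 1) := by
  induction ys with
  | nil =>
      intro n v i j _
      cases n <;> simp [pvF, pvBInner, pvBGo]
  | cons y rest ih =>
      intro n v i j hn
      by_cases h : y = v
      · subst h
        rw [pvF, if_neg (by simp)]
        rw [show pvBInner y i (y :: rest) j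
              = ((j, i) :: (pvBInner y i rest (j + 1)).1, (pvBInner y i rest (j + 1)).2) by
          rw [pvBInner, if_pos rfl]]
        simp only [List.cons_append]
        rw [ih n y i (j + 1) (by simpa using Nat.le_of_succ_le hn)]
      · rw [pvF, if_pos h]
        rw [show pvBInner v i (y :: rest) j = ([], y :: rest, j) by
          rw [pvBInner, if_neg h]]
        obtain ⟨m, rfl⟩ : ∃ m, n = m + 1 := by
          cases n with
          | zero => simp at hn
          | succ m => exact ⟨m, rfl⟩
        rw [show pvBGo (m + 1) (y :: rest) j (i + 1)
              = ((j, i + 1) :: (pvBInner y (i + 1) rest (j + 1)).1)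
                ++ pvBGo m (pvBInner y (i + 1) rest (j + 1)).2.1
                    (pvBInner y (i + 1) rest (j + 1)).2.2 (i + 1 + 1) from rfl]
        simp only [List.nil_append, List.cons_append]
        rw [ih m y (i + 1) (j + 1) (by simpa using Nat.lt_succ_iff.mp hn)]

-- ===== VERDICT (by name: the statement is the Claim_ definition above) =====
theorem speaker_segment_ixs_spec : Claim_equal_speaker_segment_ixs := by
  intro xs _ hpre
  unfold Spec_speaker_segment_ixs
  match xs, hpre with
  | p :: rest, _ =>
    show (pvALoop (p :: rest) 0 p 0 PySem.Dict.empty).items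
        = pvBGo (p :: rest).length (p :: rest) 0 0
    rw [pvALoop_items (p :: rest) 0 p 0 PySem.Dict.empty (by simp [PySem.Dict.empty])]
    rw [show (PySem.Dict.empty : PySem.Dict Int Int).items = [] from rfl, List.nil_append]
    rw [show pvBGo (p :: rest).length (p :: rest) 0 0
          = ((0, 0) :: (pvBInner p 0 rest 1).1)
            ++ pvBGo rest.length (pvBInner p 0 rest 1).2.1 (pvBInner p 0 rest 1).2.2 1
        from rfl]
    rw [pvF, if_neg (by simp)]
    simp only [List.cons_append]
    rw [pvF_eq_bGo rest rest.length p 0 (0 + 1) le_rfl]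
    norm_num
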